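-- pv_equiv track=rewrite | github.com/bob686868/Leetcode-100-day-challenge- | day37.py | lc3228
-- ===== SOURCE A (Python) =====
-- def lc3228(s):
--     numOnes,steps=0,0
--     for i in range(len(s)-1):
--         c=s[i]
--         if c!="1":continue
--         numOnes+=1
--         if s[i+1]=="0":
--             steps+=numOnes
--     return steps
-- ===== SOURCE B (Python) =====
-- def lc3228(s):
--     prefix = []
--     ones = 0
--     for c in s:
--         if c == "1":
--             ones += 1
--         prefix.append(ones)
--     return sum(prefix[i] for i in range(len(s) - 1)
--                if s[i] == "1" and s[i + 1] == "0")
-- ===== Notes on version B (the rewrite author's own statement) =====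
-- stated objective: alternative
-- what changed: B works in two staged passes: it first builds a prefix array of running one-counts, then sums the prefix value at every index where a one is immediately followed by a zero, instead of A's single stateful loop that carries the ones-count and adds it at each such boundary.
import Mathlib
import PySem

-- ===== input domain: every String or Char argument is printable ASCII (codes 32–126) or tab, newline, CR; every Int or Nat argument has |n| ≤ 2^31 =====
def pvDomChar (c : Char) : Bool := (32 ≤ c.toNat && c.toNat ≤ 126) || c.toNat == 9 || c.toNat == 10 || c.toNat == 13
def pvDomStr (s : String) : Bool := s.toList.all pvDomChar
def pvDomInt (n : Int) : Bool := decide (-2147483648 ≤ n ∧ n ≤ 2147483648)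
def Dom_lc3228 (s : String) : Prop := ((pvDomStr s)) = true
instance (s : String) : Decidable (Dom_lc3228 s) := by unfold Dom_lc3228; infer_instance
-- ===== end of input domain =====

-- B re-implements A in two staged passes (a prefix array of running one-counts, then a sum of
-- the prefix values at the one-followed-by-zero boundary indices) instead of A's single stateful
-- loop — an alternative decomposition of the same O(n) computation; no speed claim.

-- ===== PORT A =====
-- single left-to-right loop: count ones seen, add that count at each '10' boundary
def lc3228 (s : String) : Int :=
  let l := s.toList
  let st := (PySem.List.pyRange 0 ((l.length : Int) - 1) 1).foldl
    (fun (st : Int × Int) i =>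
      let c := PySem.List.pyGetD l i ' '
      if c ≠ '1' then st
      else
        let numOnes := st.1 + 1
        if PySem.List.pyGetD l (i + 1) ' ' = '0' then (numOnes, st.2 + numOnes)
        else (numOnes, st.2))
    (0, 0)
  st.2

-- ===== PORT B =====
-- first pass: the prefix list of running '1'-counts (prefix.append(ones) for each char)
def pvPrefList : List Char → Int → List Int
  | [], _ => []
  | c :: t, ones =>
      let o := if c = '1' then ones + 1 else ones
      o :: pvPrefList t o

-- second pass: sum(prefix[i] for i in range(len(s)-1) if s[i]=='1' and s[i+1]=='0')
def lc3228_alt (s : String) : Int :=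
  let l := s.toList
  let pre := pvPrefList l 0
  (((PySem.List.pyRange 0 ((l.length : Int) - 1) 1).filter
      (fun i => decide (PySem.List.pyGetD l i ' ' = '1' ∧ PySem.List.pyGetD l (i + 1) ' ' = '0'))).map
      (fun i => PySem.List.pyGetD pre i 0)).sum

-- ===== PRECONDITION & SPEC =====
def Spec_lc3228 (s : String) (out : Int) : Prop := out = lc3228_alt s
instance (s : String) (out : Int) : Decidable (Spec_lc3228 s out) := by unfold Spec_lc3228; infer_instance

-- ===== CLAIM (what is proved, stated in full; the proofs are below) =====
def Claim_equal_lc3228 : Prop := ∀ (s : String), Dom_lc3228 s → Spec_lc3228 s (lc3228 s)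

-- ===== LEMMAS AND PROOFS =====

-- A's step over the pair of characters at an index
def pvFA (st : Int × Int) (p : Char × Char) : Int × Int :=
  if p.1 ≠ '1' then st
  else
    let numOnes := st.1 + 1
    if p.2 = '0' then (numOnes, st.2 + numOnes) else (numOnes, st.2)

-- number of '1's among the first n+1 characters
def pvF (l : List Char) (i : Nat) : Int := ((l.take (i + 1)).countP (fun c => c == '1') : Int)

-- '10' boundary at index i
def pvCond (l : List Char) (i : Nat) : Bool := decide (l.getD i ' ' = '1' ∧ l.getD (i + 1) ' ' = '0')

theorem pvFA_pos0 (st : Int × Int) (p : Char × Char) (h1 : p.1 = '1') (h2 : p.2 = '0') :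
    pvFA st p = (st.1 + 1, st.2 + (st.1 + 1)) := by simp [pvFA, h1, h2]
theorem pvFA_pos1 (st : Int × Int) (p : Char × Char) (h1 : p.1 = '1') (h2 : ¬ p.2 = '0') :
    pvFA st p = (st.1 + 1, st.2) := by simp [pvFA, h1, h2]
theorem pvFA_neg (st : Int × Int) (p : Char × Char) (h1 : ¬ p.1 = '1') :
    pvFA st p = st := by simp [pvFA, h1]

-- characterisation of A's fold over an index range: the state after n steps
theorem pvA_inv (l : List Char) (n : Nat) (hn : n ≤ l.length) :
    (List.range n).foldl (fun st k => pvFA st (l.getD k ' ', l.getD (k + 1) ' ')) (0, 0)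
      = (((l.take n).countP (fun c => c == '1') : Int),
         (((List.range n).filter (pvCond l)).map (pvF l)).sum) := by
  induction n with
  | zero => simp
  | succ n ih =>
    have hlt : n < l.length := by omega
    have ih' := ih (by omega)
    rw [List.range_succ, List.foldl_append, ih', List.foldl_cons, List.foldl_nil]
    have htake : l.take (n + 1) = l.take n ++ [l[n]] := by
      rw [List.take_succ, List.getElem?_eq_getElem hlt]; rfl
    have hgd : l.getD n ' ' = l[n] := List.getD_eq_getElem l ' ' hlt
    have hfilt : (List.range n ++ [n]).filter (pvCond l)
        = (List.range n).filter (pvCond l) ++ if pvCond l n then [n] else [] := by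
      rw [List.filter_append]
      by_cases h : pvCond l n = true <;> simp [h]
    have hcnt : ((l.take (n + 1)).countP (fun c => c == '1') : Int)
        = ((l.take n).countP (fun c => c == '1') : Int)
          + (if l.getD n ' ' = '1' then 1 else 0) := by
      rw [htake, List.countP_append, hgd]
      by_cases h1 : l.getD n ' ' = '1' <;> simp [hgd ▸ h1]
    have hFn : pvF l n = ((l.take n).countP (fun c => c == '1') : Int)
        + (if l.getD n ' ' = '1' then 1 else 0) := hcnt
    by_cases h1 : l.getD n ' ' = '1'
    · by_cases h2 : l.getD (n + 1) ' ' = '0'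
      · have hc : pvCond l n = true := by unfold pvCond; exact decide_eq_true ⟨h1, h2⟩
        rw [pvFA_pos0 _ (l.getD n ' ', l.getD (n + 1) ' ') h1 h2, hfilt]
        simp only [hc, if_true, List.map_append, List.sum_append, List.map_cons,
          List.map_nil, List.sum_cons, List.sum_nil, hcnt, hFn, h1]
        rw [Prod.mk.injEq]
        constructor
        · simp
        · simp
      · have hc : pvCond l n = false := by unfold pvCond; exact decide_eq_false fun h => h2 h.2
        rw [pvFA_pos1 _ (l.getD n ' ', l.getD (n + 1) ' ') h1 h2, hfilt]
        simp only [hc, Bool.false_eq_true, if_false, List.append_nil, hcnt, h1, if_true]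
    · have hc : pvCond l n = false := by unfold pvCond; exact decide_eq_false fun h => h1 h.1
      rw [pvFA_neg _ (l.getD n ' ', l.getD (n + 1) ' ') h1, hfilt]
      simp only [hc, Bool.false_eq_true, if_false, List.append_nil, hcnt, h1, if_false]
      simp

-- the prefix list holds the running '1'-counts
theorem pvPref_getD (l : List Char) (a : Int) (i : Nat) (h : i < l.length) :
    (pvPrefList l a).getD i 0 = a + ((l.take (i + 1)).countP (fun c => c == '1') : Int) := by
  induction l generalizing a i with
  | nil => simp at h
  | cons c t ih =>
    cases i with
    | zero =>
      by_cases hc : c = '1' <;> simp [pvPrefList, hc, List.countP_cons]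
    | succ i =>
      have h' : i < t.length := by simpa using h
      have step : (pvPrefList (c :: t) a).getD (i + 1) 0
          = (pvPrefList t (if c = '1' then a + 1 else a)).getD i 0 := by
        by_cases hc : c = '1' <;> simp [pvPrefList, hc]
      rw [step, List.take_succ_cons, List.countP_cons]
      by_cases hc : c = '1'
      · rw [if_pos hc, ih _ _ h']
        simp only [hc, beq_self_eq_true, if_pos]
        push_cast
        ring
      · rw [if_neg hc, ih _ _ h']
        simp [hc]

-- port A as a fold over List.range
theorem pvA_range (s : String) :
    lc3228 s = ((List.range (s.toList.length - 1)).foldl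
      (fun st k => pvFA st (s.toList.getD k ' ', s.toList.getD (k + 1) ' ')) (0, 0)).2 := by
  simp only [lc3228]
  rw [PySem.List.pyRange_one, List.foldl_map]
  have hN : ((s.toList.length : Int) - 1 - 0).toNat = s.toList.length - 1 := by omega
  rw [hN]
  congr 1
  apply List.foldl_ext
  intro st k _
  have h1 : PySem.List.pyGetD s.toList (0 + (k : Int)) ' ' = s.toList.getD k ' ' := by simp
  have h2 : PySem.List.pyGetD s.toList (0 + (k : Int) + 1) ' ' = s.toList.getD (k + 1) ' ' := by
    have e : (0 : Int) + (k : Int) + 1 = ((k + 1 : Nat) : Int) := by push_cast; ring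
    rw [e]; exact PySem.List.pyGetD_natCast s.toList (k + 1) ' '
  simp only [pvFA, h1, h2]

-- port B as a filtered sum over List.range
theorem pvB_range (s : String) :
    lc3228_alt s = (((List.range (s.toList.length - 1)).filter (pvCond s.toList)).map
      (pvF s.toList)).sum := by
  simp only [lc3228_alt]
  rw [PySem.List.pyRange_one]
  have hN : ((s.toList.length : Int) - 1 - 0).toNat = s.toList.length - 1 := by omega
  rw [hN, List.filter_map, List.map_map]
  have hfil : (List.range (s.toList.length - 1)).filter
      ((fun i => decide (PySem.List.pyGetD s.toList i ' ' = '1' ∧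
          PySem.List.pyGetD s.toList (i + 1) ' ' = '0')) ∘ fun k : Nat => 0 + (k : Int))
      = (List.range (s.toList.length - 1)).filter (pvCond s.toList) := by
    apply List.filter_congr
    intro k _
    simp only [Function.comp_apply, pvCond, zero_add]
    rw [show ((k : Int) + 1) = ((k + 1 : Nat) : Int) by push_cast; ring,
        PySem.List.pyGetD_natCast, PySem.List.pyGetD_natCast]
  rw [hfil]
  congr 1
  apply List.map_congr_left
  intro k hk
  rw [List.mem_filter, List.mem_range] at hk
  have hkl : k < s.toList.length := by omega
  simp only [Function.comp_apply, zero_add, PySem.List.pyGetD_natCast,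
    pvPref_getD s.toList 0 k hkl, pvF, zero_add]

-- ===== VERDICT (by name: the statement is the Claim_ definition above) =====
theorem lc3228_spec : Claim_equal_lc3228 := by
  intro s _
  unfold Spec_lc3228
  rw [pvA_range, pvB_range,
    pvA_inv s.toList (s.toList.length - 1) (by omega)]
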